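-- pv_equiv track=rewrite | github.com/Yash9988/self-learn | leetcode/2429.py | minimizeXor_alt
-- ===== SOURCE A (Python) =====
-- def minimizeXor_alt(num1: int, num2: int) -> int:
--
--     need = num2.bit_count() - num1.bit_count()                      # Compute the bit-difference
--
--     if not need:                                                    # Check if the diff is zero
--         return num1                                                 # Return num1 as result, as is
--
--     curr = 1                                                        # Initialise bit-pointer
--
--     while need:                                                     # While the required bits are non-zero
--         # Check if we need to add more bits and the curr-bit is unset
--         if need > 0 and not num1 & curr:
--             num1 |= curr                                            # Set the curr-but
--             need -= 1                                               # Decrement the counter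
--         # Check if we need to reduce bits and the curr-bit is set
--         elif need < 0 and num1 & curr:
--             num1 ^= curr                                            # Unset the curr-bit
--             need += 1                                               # Increment the counter
--
--         curr <<= 1                                                  # Shift the pointer to the left by one-bit
--
--     return num1                                                     # Return the result
-- ===== SOURCE B (Python) =====
-- def minimizeXor_alt(num1: int, num2: int) -> int:
--     # keep num1's highest set bits up to num2's popcount, then pad with the lowest free bits
--     need = num2.bit_count()
--     hi = num1.bit_length() + need
--     res = 0
--     for i in reversed(range(hi)):
--         if need and (num1 >> i) & 1:
--             res |= 1 << i
--             need -= 1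
--     for i in range(hi):
--         if need and not (res >> i) & 1:
--             res |= 1 << i
--             need -= 1
--     return res
-- ===== Notes on version B (the rewrite author's own statement) =====
-- stated objective: idiomatic
-- what changed: Replaces A's single interleaved low-to-high while-loop that mutates num1 (setting or clearing bits depending on the sign of the deficit) by the standard two-pass construction: build a fresh result by copying num1's highest set bits until num2's popcount is reached, then pad remaining bits from the lowest free positions.
-- outside the precondition, e.g. on minimizeXor_alt(-2, 0): A returns -4, B returns 0
import Mathlib
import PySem

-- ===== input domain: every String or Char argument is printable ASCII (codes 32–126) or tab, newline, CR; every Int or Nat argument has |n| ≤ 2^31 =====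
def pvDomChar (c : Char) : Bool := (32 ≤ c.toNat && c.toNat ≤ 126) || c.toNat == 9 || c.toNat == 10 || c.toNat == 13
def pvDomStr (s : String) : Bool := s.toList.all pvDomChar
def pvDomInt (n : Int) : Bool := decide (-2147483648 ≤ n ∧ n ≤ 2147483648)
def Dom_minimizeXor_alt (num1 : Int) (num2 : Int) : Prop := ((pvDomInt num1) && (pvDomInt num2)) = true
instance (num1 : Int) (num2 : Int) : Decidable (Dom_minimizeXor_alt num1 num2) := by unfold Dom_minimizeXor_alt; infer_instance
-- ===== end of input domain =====

-- B rebuilds the answer by copying num1's highest set bits and padding with the lowest free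
-- positions (two bounded passes), instead of A's single sign-driven low-to-high mutation loop;
-- same cost, more idiomatic.

-- ===== PORT A =====
-- A's `while need:` loop; the fuel argument only makes the recursion total, the loop body and
-- branch order are A's.  Fuel `bitLength num1 + bitLength num2 + 2` is proved sufficient on Pre_.
def pvAloop : Nat → Int → Int → Int → Int
  | 0, n1, _, _ => n1
  | f + 1, n1, need, curr =>
    if need = 0 then n1
    else if 0 < need ∧ PySem.Int.band n1 curr = 0 then
      pvAloop f (PySem.Int.bor n1 curr) (need - 1) (curr <<< (1 : Nat))
    else if need < 0 ∧ PySem.Int.band n1 curr ≠ 0 then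
      pvAloop f (PySem.Int.bxor n1 curr) (need + 1) (curr <<< (1 : Nat))
    else pvAloop f n1 need (curr <<< (1 : Nat))

def minimizeXor_alt (num1 : Int) (num2 : Int) : Int :=
  let need : Int := (PySem.Int.bitCount num2 : Int) - (PySem.Int.bitCount num1 : Int)
  if need = 0 then num1
  else pvAloop (PySem.Int.bitLength num1 + PySem.Int.bitLength num2 + 2) num1 need 1

-- ===== PORT B =====
def minimizeXor_alt_alt (num1 : Int) (num2 : Int) : Int :=
  let t := PySem.Int.bitCount num2
  let hi := PySem.Int.bitLength num1 + t
  -- for i in reversed(range(hi)): copy num1's set bits from the top while bits remain to place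
  let s1 := ((List.range hi).reverse).foldl
    (fun (st : Nat × Nat) (i : Nat) =>
      if st.2 ≠ 0 ∧ PySem.Int.band (num1 >>> i) 1 ≠ 0 then (st.1 ||| ((1:Nat) <<< i), st.2 - 1) else st)
    (0, t)
  -- for i in range(hi): pad with the lowest unset positions of res
  let s2 := (List.range hi).foldl
    (fun (st : Nat × Nat) (i : Nat) =>
      if st.2 ≠ 0 ∧ (st.1 >>> i) &&& 1 = 0 then (st.1 ||| ((1:Nat) <<< i), st.2 - 1) else st)
    s1
  (s2.1 : Int)

-- ===== PRECONDITION & SPEC =====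
-- Pre_ excludes negative num1: there A's loop walks num1's infinite two's-complement bits and
-- diverges on many inputs (e.g. num1 = -1, num2 = 3), and where it does return the value is an
-- accident of two's complement outside the problem's positive-integer domain; num2 stays free.
def Pre_minimizeXor_alt (num1 : Int) (num2 : Int) : Prop := 0 ≤ num1
instance (num1 : Int) (num2 : Int) : Decidable (Pre_minimizeXor_alt num1 num2) := by
  unfold Pre_minimizeXor_alt; infer_instance
def pvWitness_minimizeXor_alt : Int × Int := (5, 3)

def Spec_minimizeXor_alt (num1 : Int) (num2 : Int) (out : Int) : Prop := out = minimizeXor_alt_alt num1 num2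
instance (num1 : Int) (num2 : Int) (out : Int) : Decidable (Spec_minimizeXor_alt num1 num2 out) := by unfold Spec_minimizeXor_alt; infer_instance

-- ===== CLAIM (what is proved, stated in full; the proofs are below) =====
def Claim_equal_minimizeXor_alt : Prop := ∀ (num1 : Int) (num2 : Int), Dom_minimizeXor_alt num1 num2 → Pre_minimizeXor_alt num1 num2 → Spec_minimizeXor_alt num1 num2 (minimizeXor_alt num1 num2)

-- ===== LEMMAS AND PROOFS =====

/-! Nat-level mirrors of the two programs' loops, and counting helpers. -/

-- set bits of `n` in positions `[i, i+s)`
def cntR (n : Nat) : Nat → Nat → Nat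
  | _, 0 => 0
  | i, s + 1 => (if n.testBit i then 1 else 0) + cntR n (i + 1) s

-- unset bits of `n` in positions `[i, i+s)`
def zcntR (n : Nat) : Nat → Nat → Nat
  | _, 0 => 0
  | i, s + 1 => (if n.testBit i then 0 else 1) + zcntR n (i + 1) s

-- sum of the `k` highest set bits of `n` below position `j`
def topSum (n : Nat) : Nat → Nat → Nat
  | 0, _ => 0
  | j + 1, k => if k ≠ 0 ∧ n.testBit j then 2 ^ j + topSum n j (k - 1) else topSum n j k

-- mirror of B's first (descending) pass
def downP (a : Nat) : Nat → Nat × Nat → Nat × Nat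
  | 0, st => st
  | j + 1, st => downP a j (if st.2 ≠ 0 ∧ a.testBit j then (st.1 + 2 ^ j, st.2 - 1) else st)

-- mirror of B's second (ascending, filling) pass (state = (res, still-needed))
def upN : Nat → Nat → Nat → Nat → Nat × Nat
  | 0, res, k, _ => (res, k)
  | s + 1, res, k, i => if k ≠ 0 ∧ ¬ res.testBit i then upN s (res + 2 ^ i) (k - 1) (i + 1) else upN s res k (i + 1)

-- mirror of A's while loop over Nat state (curr = 2^i)
def aloopN : Nat → Nat → Int → Nat → Nat
  | 0, n, _, _ => n
  | f + 1, n, need, i =>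
    if need = 0 then n
    else if 0 < need ∧ ¬ n.testBit i then aloopN f (n + 2 ^ i) (need - 1) (i + 1)
    else if need < 0 ∧ n.testBit i then aloopN f (n - 2 ^ i) (need + 1) (i + 1)
    else aloopN f n need (i + 1)

-- basic bit lemmas
theorem lor_two_pow_of_testBit_false {n i : Nat} (h : n.testBit i = false) :
    n ||| 2 ^ i = n + 2 ^ i := by
  induction i generalizing n with
  | zero =>
    have h0 : n % 2 = 0 := by
      have ht := Nat.testBit_eq_decide_div_mod_eq (i := 0) (x := n)
      rw [h] at ht
      have := of_decide_eq_false ht.symm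
      simp at this
      omega
    have hb : n = Nat.bit false (n / 2) := by simp [Nat.bit]; omega
    rw [hb]
    have h1 : (1 : Nat) = Nat.bit true 0 := rfl
    rw [pow_zero, h1, Nat.lor_bit]
    simp [Nat.bit]
  | succ i ih =>
    have hb : n = Nat.bit (n % 2 = 1) (n / 2) := by
      simp [Nat.bit]
      rcases Nat.mod_two_eq_zero_or_one n with h2 | h2 <;> simp [h2] <;> omega
    have hp : (2 ^ (i + 1) : Nat) = Nat.bit false (2 ^ i) := by
      simp [Nat.bit]; ring
    have ht : (n / 2).testBit i = false := by
      rw [← Nat.testBit_succ]; exact h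
    rw [hb, hp, Nat.lor_bit]
    have := ih ht
    simp only [this, Nat.bit]
    rcases Nat.mod_two_eq_zero_or_one n with h2 | h2 <;> simp [h2] <;> ring

theorem two_pow_le_of_testBit' {n i : Nat} (h : n.testBit i = true) : 2 ^ i ≤ n := by
  have := Nat.testBit_eq_decide_div_mod_eq (i := i) (x := n)
  rw [h] at this
  have h2 : n / 2 ^ i % 2 = 1 := by simpa using this.symm
  have : 1 ≤ n / 2 ^ i := by
    rcases Nat.eq_zero_or_pos (n / 2 ^ i) with h0 | h0
    · rw [h0] at h2; simp at h2
    · exact h0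
  calc 2 ^ i = 1 * 2 ^ i := by ring
    _ ≤ (n / 2 ^ i) * 2 ^ i := by exact Nat.mul_le_mul_right _ this
    _ ≤ n := Nat.div_mul_le_self n (2 ^ i)

theorem xor_two_pow_of_testBit_true {n i : Nat} (h : n.testBit i = true) :
    n ^^^ 2 ^ i = n - 2 ^ i := by
  induction i generalizing n with
  | zero =>
    have h0 : n % 2 = 1 := by
      have ht := Nat.testBit_eq_decide_div_mod_eq (i := 0) (x := n)
      rw [h] at ht
      have := of_decide_eq_true ht.symm
      simpa using this
    have := Nat.xor_one_of_odd (n := n) (Nat.odd_iff.mpr h0)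
    simpa using this
  | succ i ih =>
    have hb : n = Nat.bit (n % 2 = 1) (n / 2) := by
      simp [Nat.bit]
      rcases Nat.mod_two_eq_zero_or_one n with h2 | h2 <;> simp [h2] <;> omega
    have hp : (2 ^ (i + 1) : Nat) = Nat.bit false (2 ^ i) := by
      simp [Nat.bit]; ring
    have ht : (n / 2).testBit i = true := by
      rw [← Nat.testBit_succ]; exact h
    have hle : 2 ^ i ≤ n / 2 := two_pow_le_of_testBit' ht
    rw [hb, hp, Nat.xor_bit]
    have := ih ht
    simp only [this, Nat.bit]
    rcases Nat.mod_two_eq_zero_or_one n with h2 | h2 <;> simp [h2] <;> omega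

theorem two_pow_le_of_testBit {n i : Nat} (h : n.testBit i = true) : 2 ^ i ≤ n :=
  two_pow_le_of_testBit' h

theorem mod_succ_split (n j : Nat) :
    n % 2 ^ (j + 1) = (if n.testBit j then 2 ^ j else 0) + n % 2 ^ j := by
  have hm : n % 2 ^ (j + 1) = n % 2 ^ j + 2 ^ j * (n / 2 ^ j % 2) := by
    rw [pow_succ]
    exact Nat.mod_mul
  have ht := Nat.testBit_eq_decide_div_mod_eq (i := j) (x := n)
  by_cases hb : n.testBit j = true
  · rw [hb] at ht
    have h1 : n / 2 ^ j % 2 = 1 := of_decide_eq_true ht.symm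
    rw [hm, h1]
    simp [hb]
    ring
  · simp only [Bool.not_eq_true] at hb
    rw [hb] at ht
    have h1 := of_decide_eq_false ht.symm
    have h2 : n / 2 ^ j % 2 = 0 := by omega
    rw [hm, h2]
    simp [hb]

theorem mod_pow_le_mod_pow (n : Nat) {i j : Nat} (h : i ≤ j) : n % 2 ^ i ≤ n % 2 ^ j := by
  have : n % 2 ^ i = (n % 2 ^ j) % 2 ^ i := by
    rw [Nat.mod_mod_of_dvd _ (pow_dvd_pow 2 h)]
  rw [this]
  exact Nat.mod_le _ _

theorem testBit_sub_two_pow {n i : Nat} (h : n.testBit i = true) {j : Nat} (hj : j ≠ i) :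
    (n - 2 ^ i).testBit j = n.testBit j := by
  rw [← xor_two_pow_of_testBit_true h, Nat.testBit_xor, Nat.testBit_two_pow]
  simp [Ne.symm hj]

theorem testBit_add_two_pow {n i : Nat} (h : n.testBit i = false) {j : Nat} (hj : j ≠ i) :
    (n + 2 ^ i).testBit j = n.testBit j := by
  rw [← lor_two_pow_of_testBit_false h, Nat.testBit_or, Nat.testBit_two_pow]
  simp [Ne.symm hj]

-- counting lemmas
theorem cntR_congr {m n : Nat} (i s : Nat)
    (h : ∀ j, i ≤ j → j < i + s → m.testBit j = n.testBit j) : cntR m i s = cntR n i s := by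
  induction s generalizing i with
  | zero => rfl
  | succ s ih =>
    simp only [cntR]
    rw [h i (le_refl i) (by omega), ih (i + 1) (fun j hj1 hj2 => h j (by omega) (by omega))]

theorem zcntR_congr {m n : Nat} (i s : Nat)
    (h : ∀ j, i ≤ j → j < i + s → m.testBit j = n.testBit j) : zcntR m i s = zcntR n i s := by
  induction s generalizing i with
  | zero => rfl
  | succ s ih =>
    simp only [zcntR]
    rw [h i (le_refl i) (by omega), ih (i + 1) (fun j hj1 hj2 => h j (by omega) (by omega))]

theorem cntR_add (n i s u : Nat) : cntR n i (s + u) = cntR n i s + cntR n (i + s) u := by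
  induction s generalizing i with
  | zero => simp [cntR]
  | succ s ih =>
    have : s + 1 + u = (s + u) + 1 := by omega
    rw [this]
    simp only [cntR]
    rw [ih (i + 1)]
    have : i + 1 + s = i + (s + 1) := by omega
    rw [this]
    omega

theorem cntR_zcntR (n i s : Nat) : cntR n i s + zcntR n i s = s := by
  induction s generalizing i with
  | zero => rfl
  | succ s ih =>
    simp only [cntR, zcntR]
    have := ih (i + 1)
    by_cases hb : n.testBit i = true <;> simp [hb] <;> omega

theorem cntR_snoc (n i s : Nat) :
    cntR n i (s + 1) = cntR n i s + (if n.testBit (i + s) then 1 else 0) := by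
  rw [cntR_add n i s 1]
  simp [cntR]

theorem cntR_mono (n i : Nat) {s u : Nat} (h : s ≤ u) : cntR n i s ≤ cntR n i u := by
  have h2 : u = s + (u - s) := by omega
  calc cntR n i s ≤ cntR n i s + cntR n (i + s) (u - s) := Nat.le_add_right _ _
    _ = cntR n i u := by rw [← cntR_add, ← h2]

theorem cntR_shift (s : Nat) : ∀ (n i : Nat), cntR n (i + 1) s = cntR (n / 2) i s := by
  induction s with
  | zero => intro n i; rfl
  | succ s ih =>
    intro n i
    simp only [cntR]
    rw [← Nat.testBit_succ, ih n (i + 1)]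

theorem cntR_zero_bits (j : Nat) : ∀ i, cntR 0 i j = 0 := by
  induction j with
  | zero => intro i; rfl
  | succ j ih => intro i; simp [cntR, Nat.zero_testBit, ih]

theorem bitCount_eq_cntR {a j : Nat} (h : a < 2 ^ j) : PySem.Int.bitCount (a : Int) = cntR a 0 j := by
  induction j generalizing a with
  | zero =>
    have : a = 0 := by simpa using h
    subst this
    show PySem.Int.bitCount ((0 : Nat) : Int) = cntR 0 0 0
    simp [PySem.Int.bitCount_zero, cntR]
  | succ j ih =>
    rcases Nat.eq_zero_or_pos a with h0 | h0
    · subst h0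
      rw [cntR_zero_bits]
      show PySem.Int.bitCount ((0 : Nat) : Int) = 0
      simp [PySem.Int.bitCount_zero]
    · rw [PySem.Int.bitCount_natCast h0]
      have hlt : a / 2 < 2 ^ j := by
        rw [pow_succ] at h
        omega
      rw [ih hlt]
      simp only [cntR]
      rw [cntR_shift j a 0]
      have ht := Nat.testBit_eq_decide_div_mod_eq (i := 0) (x := a)
      by_cases hb : a.testBit 0 = true
      · rw [hb] at ht
        have h1 : a % 2 = 1 := by
          have := of_decide_eq_true ht.symm
          simpa using this
        simp [hb, h1]
      · simp only [Bool.not_eq_true] at hb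
        rw [hb] at ht
        have h1 := of_decide_eq_false ht.symm
        simp at h1
        have h2 : a % 2 = 0 := by omega
        simp [hb, h2]

theorem mod_eq_of_cntR_eq {n x y : Nat} (hxy : x ≤ y) (h : cntR n 0 x = cntR n 0 y) :
    n % 2 ^ x = n % 2 ^ y := by
  induction y with
  | zero =>
    have : x = 0 := by omega
    subst this; rfl
  | succ y ih =>
    rcases Nat.lt_or_ge x (y + 1) with hx | hx
    · have hxy' : x ≤ y := by omega
      have h1 := cntR_mono n 0 hxy'
      have h2 := cntR_snoc n 0 y
      rw [show 0 + y = y from by omega] at h2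
      have h3 := cntR_mono n 0 (Nat.le_succ y)
      have hb : n.testBit y = false := by
        by_cases hbb : n.testBit y = true
        · rw [hbb] at h2; simp at h2; omega
        · simpa using hbb
      rw [hb] at h2
      simp at h2
      have := ih hxy' (by omega)
      rw [this, mod_succ_split, hb]
      simp
    · have : x = y + 1 := by omega
      subst this; rfl

-- topSum lemmas
theorem topSum_zero (a : Nat) : ∀ j, topSum a j 0 = 0 := by
  intro j
  induction j with
  | zero => rfl
  | succ j ih => simp [topSum, ih]

theorem topSum_all {a : Nat} (j : Nat) : ∀ {k : Nat}, cntR a 0 j ≤ k → topSum a j k = a % 2 ^ j := by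
  induction j with
  | zero =>
    intro k h
    simp [topSum, Nat.mod_one]
  | succ j ih =>
    intro k h
    have hsnoc := cntR_snoc a 0 j
    rw [show 0 + j = j from by omega] at hsnoc
    rw [mod_succ_split]
    simp only [topSum]
    by_cases hb : a.testBit j = true
    · rw [if_pos hb]
      have h' : cntR a 0 j + 1 ≤ k := by rw [hsnoc, if_pos hb] at h; omega
      rw [if_pos ⟨by omega, hb⟩, ih (by omega)]
    · have hb' : a.testBit j = false := by simpa using hb
      rw [if_neg (show ¬ (k ≠ 0 ∧ a.testBit j = true) from fun hc => hb hc.2)]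
      rw [if_neg (show ¬ a.testBit j = true by simp [hb'])]
      have h' : cntR a 0 j ≤ k := by rw [hsnoc, if_neg (by simp [hb'])] at h; omega
      simpa using ih h'

theorem topSum_cut {a : Nat} (j : Nat) : ∀ {t : Nat}, t < cntR a 0 j →
    ∃ c, 1 ≤ c ∧ c ≤ j ∧ cntR a 0 c = cntR a 0 j - t ∧ a.testBit (c - 1) = true ∧
      topSum a j t = a % 2 ^ j - a % 2 ^ c := by
  induction j with
  | zero => intro t h; simp [cntR] at h
  | succ j ih =>
    intro t h
    have hsnoc := cntR_snoc a 0 j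
    rw [show 0 + j = j from by omega] at hsnoc
    by_cases hb : a.testBit j = true
    · rcases Nat.eq_zero_or_pos t with ht0 | ht0
      · subst ht0
        refine ⟨j + 1, by omega, by omega, by omega, by simpa using hb, ?_⟩
        rw [topSum_zero]
        omega
      · have hij : t - 1 < cntR a 0 j := by
          rw [hsnoc, if_pos hb] at h
          omega
        obtain ⟨c, hc1, hc2, hc3, hc4, hc5⟩ := ih hij
        have hne : t ≠ 0 := by omega
        have h1 : a % 2 ^ c ≤ a % 2 ^ j := mod_pow_le_mod_pow a hc2
        refine ⟨c, hc1, by omega, ?_, hc4, ?_⟩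
        · rw [hc3, hsnoc, if_pos hb]
          omega
        · simp only [topSum]
          rw [if_pos ⟨hne, hb⟩, hc5, mod_succ_split, if_pos hb]
          omega
    · have hb' : a.testBit j = false := by simpa using hb
      have hij : t < cntR a 0 j := by
        rw [hsnoc, if_neg (by simp [hb'])] at h
        omega
      obtain ⟨c, hc1, hc2, hc3, hc4, hc5⟩ := ih hij
      refine ⟨c, hc1, by omega, ?_, hc4, ?_⟩
      · rw [hc3, hsnoc, if_neg (by simp [hb'])]
        omega
      · simp only [topSum]
        rw [if_neg (show ¬ (t ≠ 0 ∧ a.testBit j = true) from fun hc => hb hc.2), hc5,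
          mod_succ_split, if_neg (show ¬ a.testBit j = true by simp [hb'])]
        omega

theorem downP_eq (a : Nat) : ∀ (j res need : Nat),
    downP a j (res, need) = (res + topSum a j need, need - min need (cntR a 0 j)) := by
  intro j
  induction j with
  | zero => intro res need; simp [downP, topSum, cntR]
  | succ j ih =>
    intro res need
    have hsnoc := cntR_snoc a 0 j
    rw [show 0 + j = j from by omega] at hsnoc
    simp only [downP, topSum]
    by_cases hc : need ≠ 0 ∧ a.testBit j = true
    · rw [if_pos hc, if_pos hc, ih]
      rw [hsnoc, if_pos hc.2, Prod.mk.injEq]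
      exact ⟨by omega, by omega⟩
    · rw [if_neg hc, if_neg hc, ih, Prod.mk.injEq]
      refine ⟨rfl, ?_⟩
      by_cases hb : a.testBit j = true
      · have hk : need = 0 := by
          by_contra hk
          exact hc ⟨hk, hb⟩
        subst hk
        simp
      · have hb' : a.testBit j = false := by simpa using hb
        rw [hsnoc, if_neg (by simp [hb'])]
        simp

theorem upN_zero (s : Nat) : ∀ res i, upN s res 0 i = (res, 0) := by
  induction s with
  | zero => intro res i; rfl
  | succ s ih => intro res i; simp [upN, ih]

theorem upN_stable (s : Nat) : ∀ e res k i, k ≤ zcntR res i s → upN (s + e) res k i = upN s res k i := by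
  induction s with
  | zero =>
    intro e res k i h
    simp [zcntR] at h
    subst h
    rw [upN_zero, upN_zero]
  | succ s ih =>
    intro e res k i h
    rcases Nat.eq_zero_or_pos k with hk | hk
    · subst hk
      rw [upN_zero, upN_zero]
    · have hs : s + 1 + e = (s + e) + 1 := by omega
      rw [hs]
      by_cases hb : res.testBit i = true
      · simp only [upN]
        rw [if_neg (show ¬ (k ≠ 0 ∧ ¬ res.testBit i = true) from fun hc => hc.2 (by simp [hb])),
          if_neg (show ¬ (k ≠ 0 ∧ ¬ res.testBit i = true) from fun hc => hc.2 (by simp [hb]))]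
        apply ih
        simp only [zcntR, hb] at h
        simpa using h
      · simp only [Bool.not_eq_true] at hb
        have hk0 : k ≠ 0 := by omega
        simp only [upN]
        rw [if_pos (show k ≠ 0 ∧ ¬ res.testBit i = true from ⟨hk0, by simp [hb]⟩),
          if_pos (show k ≠ 0 ∧ ¬ res.testBit i = true from ⟨hk0, by simp [hb]⟩)]
        apply ih
        have hz : zcntR (res + 2 ^ i) (i + 1) s = zcntR res (i + 1) s :=
          zcntR_congr (i + 1) s (fun j hj1 hj2 => testBit_add_two_pow hb (by omega))
        simp only [zcntR, hb] at h
        simp at h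
        omega

-- aloopN characterisations
theorem aloopN_zero (f n i : Nat) : aloopN f n 0 i = n := by
  cases f with
  | zero => rfl
  | succ f => simp [aloopN]

theorem aloopN_pos (f : Nat) : ∀ n (k : Nat) i, aloopN f n (k : Int) i = (upN f n k i).1 := by
  induction f with
  | zero => intro n k i; rfl
  | succ f ih =>
    intro n k i
    rcases Nat.eq_zero_or_pos k with hk | hk
    · subst hk
      rw [upN_zero]
      simp only []
      rw [show ((0:Nat):Int) = (0:Int) from rfl, aloopN_zero]
    · have hk0 : (k : Int) ≠ 0 := by exact_mod_cast Nat.pos_iff_ne_zero.mp hk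
      have hkpos : (0 : Int) < (k : Int) := by exact_mod_cast hk
      simp only [aloopN, upN]
      rw [if_neg hk0]
      by_cases hb : n.testBit i = true
      · rw [if_neg (show ¬ ((0:Int) < (k:Int) ∧ ¬ n.testBit i = true) from fun hc => hc.2 (by simp [hb]))]
        rw [if_neg (show ¬ ((k:Int) < 0 ∧ n.testBit i = true) from fun hc => by omega)]
        rw [if_neg (show ¬ (k ≠ 0 ∧ ¬ n.testBit i = true) from fun hc => hc.2 (by simp [hb]))]
        exact ih n k (i + 1)
      · have hb' : ¬ n.testBit i = true := hb
        rw [if_pos ⟨hkpos, hb'⟩]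
        rw [if_pos (show k ≠ 0 ∧ ¬ n.testBit i = true from ⟨by omega, hb'⟩)]
        have hc : (k : Int) - 1 = ((k - 1 : Nat) : Int) := by omega
        rw [hc]
        exact ih (n + 2 ^ i) (k - 1) (i + 1)

theorem mod_sub_two_pow {n i x : Nat} (hb : n.testBit i = true) (hix : i < x) :
    (n - 2 ^ i) % 2 ^ x = n % 2 ^ x - 2 ^ i := by
  have hbm : (n % 2 ^ x).testBit i = true := by
    rw [Nat.testBit_mod_two_pow]
    simp [hix, hb]
  have hle : 2 ^ i ≤ n % 2 ^ x := two_pow_le_of_testBit hbm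
  have hdm := Nat.div_add_mod n (2 ^ x)
  have hlt : n % 2 ^ x - 2 ^ i < 2 ^ x :=
    lt_of_le_of_lt (Nat.sub_le _ _) (Nat.mod_lt n (by positivity))
  have hrw : n - 2 ^ i = 2 ^ x * (n / 2 ^ x) + (n % 2 ^ x - 2 ^ i) := by
    generalize hP : (2 : Nat) ^ x = P at *
    generalize hQ : (2 : Nat) ^ i = Q at *
    omega
  rw [hrw, Nat.mul_add_mod, Nat.mod_eq_of_lt hlt]

theorem cntR_lt_of_lt {n x y : Nat} (h : cntR n 0 x < cntR n 0 y) : x < y := by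
  by_contra hc
  have := cntR_mono n 0 (show y ≤ x by omega)
  omega

theorem aloopN_neg (f : Nat) : ∀ n m i d, 0 < m → i < d → d - i ≤ f →
    cntR n 0 d - cntR n 0 i = m → n.testBit (d - 1) = true →
    aloopN f n (-(m : Int)) i = n - (n % 2 ^ d - n % 2 ^ i) := by
  induction f with
  | zero => intro n m i d h1 h2 h3 h4 h5; omega
  | succ f ih =>
    intro n m i d hm hid hf hcnt hbit
    have hmono : cntR n 0 i ≤ cntR n 0 d := cntR_mono n 0 (by omega)
    have hm0 : -((m : Int)) ≠ 0 := by omega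
    have hmneg : -((m : Int)) < 0 := by omega
    have hsnoc := cntR_snoc n 0 i
    rw [show 0 + i = i from by omega] at hsnoc
    simp only [aloopN]
    rw [if_neg hm0]
    rw [if_neg (show ¬ ((0:Int) < -(m:Int) ∧ ¬ n.testBit i = true) from fun hc => by omega)]
    by_cases hb : n.testBit i = true
    · rw [if_pos ⟨hmneg, hb⟩]
      have hms : (2 ^ i : Nat) ≤ n % 2 ^ (i + 1) := by
        rw [mod_succ_split, if_pos hb]
        omega
      have hmsp : n % 2 ^ (i + 1) = 2 ^ i + n % 2 ^ i := by
        rw [mod_succ_split, if_pos hb]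
      have hci : cntR n 0 (i + 1) = cntR n 0 i + 1 := by rw [hsnoc, if_pos hb]
      rcases Nat.lt_or_ge m 2 with hm1 | hm2
      · -- m = 1 : this clearing step finishes the loop
        have hm1' : m = 1 := by omega
        subst hm1'
        have hstep : -((1 : Nat) : Int) + 1 = 0 := by omega
        rw [hstep, aloopN_zero]
        have hcd : cntR n 0 (i + 1) = cntR n 0 d := by omega
        have := mod_eq_of_cntR_eq (show i + 1 ≤ d by omega) hcd
        have hle : n % 2 ^ i ≤ n % 2 ^ d := mod_pow_le_mod_pow n (by omega)
        have hnd : n % 2 ^ d ≤ n := Nat.mod_le _ _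
        omega
      · -- m ≥ 2 : recurse on n - 2^i
        have hstep : -((m : Nat) : Int) + 1 = -(((m - 1 : Nat) : Int)) := by omega
        rw [hstep]
        have hd2 : i + 1 < d := by
          apply cntR_lt_of_lt (n := n)
          omega
        have hcongr : ∀ j, i + 1 ≤ j → (n - 2 ^ i).testBit j = n.testBit j := by
          intro j hj
          exact testBit_sub_two_pow hb (by omega)
        have hsplitn : cntR n 0 d = cntR n 0 (i + 1) + cntR n (i + 1) (d - (i + 1)) := by
          have := cntR_add n 0 (i + 1) (d - (i + 1))
          rw [show (i + 1) + (d - (i + 1)) = d from by omega] at this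
          simpa using this
        have hsplitn' : cntR (n - 2 ^ i) 0 d =
            cntR (n - 2 ^ i) 0 (i + 1) + cntR (n - 2 ^ i) (i + 1) (d - (i + 1)) := by
          have := cntR_add (n - 2 ^ i) 0 (i + 1) (d - (i + 1))
          rw [show (i + 1) + (d - (i + 1)) = d from by omega] at this
          simpa using this
        have hctail : cntR (n - 2 ^ i) (i + 1) (d - (i + 1)) = cntR n (i + 1) (d - (i + 1)) :=
          cntR_congr _ _ (fun j hj1 hj2 => hcongr j hj1)
        have hchead : cntR (n - 2 ^ i) 0 (i + 1) = cntR n 0 (i + 1) - 1 := by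
          have h1 : cntR (n - 2 ^ i) 0 (i + 1) = cntR (n - 2 ^ i) 0 i +
              (if (n - 2 ^ i).testBit i then 1 else 0) := by
            have := cntR_snoc (n - 2 ^ i) 0 i
            rw [show 0 + i = i from by omega] at this
            exact this
          have h2 : cntR (n - 2 ^ i) 0 i = cntR n 0 i :=
            cntR_congr _ _ (fun j hj1 hj2 => testBit_sub_two_pow hb (by omega))
          have h3 : (n - 2 ^ i).testBit i = false := by
            rw [← xor_two_pow_of_testBit_true hb, Nat.testBit_xor, Nat.testBit_two_pow]
            simp [hb]
          rw [h1, h2, h3, hci]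
          simp
        have hrec := ih (n - 2 ^ i) (m - 1) (i + 1) d (by omega) hd2 (by omega)
          (by omega)
          (by rw [hcongr (d - 1) (by omega)]; exact hbit)
        rw [hrec]
        have hmd : (n - 2 ^ i) % 2 ^ d = n % 2 ^ d - 2 ^ i := mod_sub_two_pow hb hid
        have hmi : (n - 2 ^ i) % 2 ^ (i + 1) = n % 2 ^ (i + 1) - 2 ^ i :=
          mod_sub_two_pow hb (by omega)
        have hle1 : n % 2 ^ (i + 1) ≤ n % 2 ^ d := mod_pow_le_mod_pow n (by omega)
        have hnd : n % 2 ^ d ≤ n := Nat.mod_le _ _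
        have h2in : 2 ^ i ≤ n := two_pow_le_of_testBit hb
        omega
    · have hb' : n.testBit i = false := by simpa using hb
      rw [if_neg (show ¬ (-(m:Int) < 0 ∧ n.testBit i = true) from fun hc => hb hc.2)]
      have hci : cntR n 0 (i + 1) = cntR n 0 i := by rw [hsnoc, if_neg (by simp [hb'])]; simp
      have hd2 : i + 1 < d := by
        apply cntR_lt_of_lt (n := n)
        omega
      have hrec := ih n m (i + 1) d hm hd2 (by omega) (by omega) hbit
      rw [hrec]
      have hmsp : n % 2 ^ (i + 1) = n % 2 ^ i := by
        rw [mod_succ_split, if_neg (by simp [hb'])]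
        simp
      omega

-- bridges: Int ports to Nat mirrors
theorem two_pow_cast_shift (i : Nat) :
    (((2 ^ i : Nat) : Int)) <<< (1 : Nat) = ((2 ^ (i + 1) : Nat) : Int) := by
  rw [← Int.natCast_shiftLeft]
  congr 1
  rw [Nat.shiftLeft_eq]
  ring

theorem band_two_pow_zero_iff (n i : Nat) :
    PySem.Int.band (n : Int) ((2 ^ i : Nat) : Int) = 0 ↔ n.testBit i = false := by
  rw [PySem.Int.band_natCast, Nat.and_two_pow]
  cases hb : n.testBit i <;> simp

theorem pvAloop_bridge (f : Nat) : ∀ (n : Nat) (need : Int) (i : Nat),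
    pvAloop f (n : Int) need ((2 ^ i : Nat) : Int) = (aloopN f n need i : Int) := by
  induction f with
  | zero => intro n need i; rfl
  | succ f ih =>
    intro n need i
    simp only [pvAloop, aloopN]
    by_cases h0 : need = 0
    · rw [if_pos h0, if_pos h0]
    · rw [if_neg h0, if_neg h0]
      by_cases hb : n.testBit i = true
      · have hband : ¬ PySem.Int.band (n : Int) ((2 ^ i : Nat) : Int) = 0 := by
          rw [band_two_pow_zero_iff]
          simp [hb]
        rw [if_neg (show ¬ (0 < need ∧ PySem.Int.band (n : Int) ((2 ^ i : Nat) : Int) = 0) from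
          fun hc => hband hc.2)]
        rw [if_neg (show ¬ (0 < need ∧ ¬ n.testBit i = true) from fun hc => hc.2 hb)]
        by_cases hneg : need < 0
        · rw [if_pos (show need < 0 ∧ PySem.Int.band (n : Int) ((2 ^ i : Nat) : Int) ≠ 0 from
            ⟨hneg, hband⟩)]
          rw [if_pos (show need < 0 ∧ n.testBit i = true from ⟨hneg, hb⟩)]
          rw [two_pow_cast_shift, PySem.Int.bxor_natCast, xor_two_pow_of_testBit_true hb]
          exact ih (n - 2 ^ i) (need + 1) (i + 1)
        · rw [if_neg (show ¬ (need < 0 ∧ PySem.Int.band (n : Int) ((2 ^ i : Nat) : Int) ≠ 0) from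
            fun hc => hneg hc.1)]
          rw [if_neg (show ¬ (need < 0 ∧ n.testBit i = true) from fun hc => hneg hc.1)]
          rw [two_pow_cast_shift]
          exact ih n need (i + 1)
      · have hb' : n.testBit i = false := by simpa using hb
        have hband : PySem.Int.band (n : Int) ((2 ^ i : Nat) : Int) = 0 :=
          (band_two_pow_zero_iff n i).mpr hb'
        by_cases hpos : 0 < need
        · rw [if_pos (show 0 < need ∧ PySem.Int.band (n : Int) ((2 ^ i : Nat) : Int) = 0 from
            ⟨hpos, hband⟩)]
          rw [if_pos (show 0 < need ∧ ¬ n.testBit i = true from ⟨hpos, hb⟩)]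
          rw [two_pow_cast_shift, PySem.Int.bor_natCast, lor_two_pow_of_testBit_false hb']
          exact ih (n + 2 ^ i) (need - 1) (i + 1)
        · rw [if_neg (show ¬ (0 < need ∧ PySem.Int.band (n : Int) ((2 ^ i : Nat) : Int) = 0) from
            fun hc => hpos hc.1)]
          rw [if_neg (show ¬ (0 < need ∧ ¬ n.testBit i = true) from fun hc => hpos hc.1)]
          rw [if_neg (show ¬ (need < 0 ∧ PySem.Int.band (n : Int) ((2 ^ i : Nat) : Int) ≠ 0) from
            fun hc => hc.2 hband)]
          rw [if_neg (show ¬ (need < 0 ∧ n.testBit i = true) from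
            fun hc => by rw [hb'] at hc; exact Bool.false_ne_true hc.2)]
          rw [two_pow_cast_shift]
          exact ih n need (i + 1)

theorem shift_band_one (a i : Nat) :
    (PySem.Int.band ((a : Int) >>> i) 1 ≠ 0) ↔ a.testBit i = true := by
  rw [← Int.natCast_shiftRight, show ((1:Int)) = ((1 : Nat) : Int) from rfl, PySem.Int.band_natCast]
  rw [Nat.shiftRight_eq_div_pow, Nat.and_one_is_mod]
  rw [Nat.testBit_eq_decide_div_mod_eq]
  constructor
  · intro h
    have h2 : a / 2 ^ i % 2 = 1 := by
      rcases Nat.mod_two_eq_zero_or_one (a / 2 ^ i) with h2 | h2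
      · rw [h2] at h; simp at h
      · exact h2
    simp [h2]
  · intro h
    have := of_decide_eq_true h
    rw [this]
    simp

theorem nat_shift_band_one (r i : Nat) :
    ((r >>> i) &&& 1 = 0) ↔ r.testBit i = false := by
  rw [Nat.shiftRight_eq_div_pow, Nat.and_one_is_mod, Nat.testBit_eq_decide_div_mod_eq]
  constructor
  · intro h
    simp [h]
  · intro h
    have := of_decide_eq_false h
    omega

theorem pass1_bridge (a : Nat) : ∀ (j : Nat) (res need : Nat), 2 ^ j ∣ res →
    ((List.range j).reverse).foldl
      (fun (st : Nat × Nat) (i : Nat) =>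
        if st.2 ≠ 0 ∧ PySem.Int.band ((a : Int) >>> i) 1 ≠ 0 then (st.1 ||| ((1:Nat) <<< i), st.2 - 1) else st)
      (res, need) = downP a j (res, need) := by
  intro j
  induction j with
  | zero => intro res need _; rfl
  | succ j ih =>
    intro res need hdvd
    rw [List.range_succ, List.reverse_append]
    simp only [List.reverse_singleton, List.singleton_append, List.foldl_cons]
    simp only [downP]
    by_cases hc : need ≠ 0 ∧ a.testBit j = true
    · rw [if_pos ⟨hc.1, (shift_band_one a j).mpr hc.2⟩, if_pos hc]
      have hbj : res.testBit j = false := by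
        rcases hdvd with ⟨q, hq⟩
        subst hq
        rw [show (2:Nat) ^ (j + 1) * q = (2 ^ j * (2 * q)) from by ring]
        rw [Nat.testBit_two_pow_mul]
        simp
      rw [Nat.one_shiftLeft, lor_two_pow_of_testBit_false hbj]
      apply ih
      rcases hdvd with ⟨q, hq⟩
      exact ⟨2 * q + 1, by rw [hq]; ring⟩
    · rw [if_neg (fun hk => hc ⟨hk.1, (shift_band_one a j).mp hk.2⟩), if_neg hc]
      apply ih
      rcases hdvd with ⟨q, hq⟩
      exact ⟨2 * q, by rw [hq]; ring⟩

theorem pass2_bridge : ∀ (s i res need : Nat),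
    (List.range' i s).foldl
      (fun (st : Nat × Nat) (i : Nat) =>
        if st.2 ≠ 0 ∧ (st.1 >>> i) &&& 1 = 0 then (st.1 ||| ((1:Nat) <<< i), st.2 - 1) else st)
      (res, need) = upN s res need i := by
  intro s
  induction s with
  | zero => intro i res need; rfl
  | succ s ih =>
    intro i res need
    rw [List.range'_succ]
    simp only [List.foldl_cons, upN]
    by_cases hc : need ≠ 0 ∧ ¬ res.testBit i = true
    · have hb' : res.testBit i = false := by simpa using hc.2
      rw [if_pos ⟨hc.1, (nat_shift_band_one res i).mpr hb'⟩, if_pos hc]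
      rw [Nat.one_shiftLeft, lor_two_pow_of_testBit_false hb']
      exact ih (i + 1) (res + 2 ^ i) (need - 1)
    · rw [if_neg (fun hk => hc ⟨hk.1, by simp [(nat_shift_band_one res i).mp hk.2]⟩), if_neg hc]
      exact ih (i + 1) res need

theorem range_eq_range' (n : Nat) : List.range n = List.range' 0 n := List.range_eq_range'

-- ===== VERDICT (by name: the statement is the Claim_ definition above) =====
theorem minimizeXor_alt_spec : Claim_equal_minimizeXor_alt := by
  unfold Claim_equal_minimizeXor_alt
  intro num1 num2 _hdom hpre
  unfold Spec_minimizeXor_alt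
  unfold Pre_minimizeXor_alt at hpre
  lift num1 to Nat using hpre with a
  simp only [minimizeXor_alt, minimizeXor_alt_alt]
  set t := PySem.Int.bitCount num2 with ht
  set p := PySem.Int.bitCount ((a : Nat) : Int) with hp
  set L := PySem.Int.bitLength ((a : Nat) : Int) with hL
  set L2 := PySem.Int.bitLength num2 with hL2
  have ha : a < 2 ^ L := by
    have := PySem.Int.lt_two_pow_bitLength ((a : Nat) : Int)
    simpa using this
  have hahi : a < 2 ^ (L + t) := by
    calc a < 2 ^ L := ha
      _ ≤ 2 ^ (L + t) := Nat.pow_le_pow_right (by omega) (by omega)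
  have hcnt : cntR a 0 (L + t) = p := (bitCount_eq_cntR hahi).symm
  have htL2 : t ≤ L2 := PySem.Int.bitCount_le_bitLength num2
  have hpL : p ≤ L := PySem.Int.bitCount_le_bitLength ((a : Nat) : Int)
  have hamod : a % 2 ^ (L + t) = a := Nat.mod_eq_of_lt hahi
  -- rewrite B's two passes through the Nat mirrors
  rw [pass1_bridge a (L + t) 0 t (dvd_zero _), downP_eq, range_eq_range', hcnt]
  rcases Nat.lt_trichotomy t p with htp | htp | htp
  · -- t < p : A unsets the lowest p - t set bits; B keeps the top t set bits
    have hne : ((t : Int) - (p : Int)) ≠ 0 := by omega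
    rw [if_neg hne]
    have hmin : min t p = t := by omega
    have hcut := topSum_cut (a := a) (L + t) (t := t) (by omega)
    obtain ⟨c, hc1, hc2, hc3, hc4, hc5⟩ := hcut
    rw [hcnt] at hc3
    rw [hmin, hc5, hamod]
    simp only [Nat.sub_self, Nat.zero_add]
    rw [pass2_bridge, upN_zero]
    have hcast : (t : Int) - (p : Int) = -(((p - t : Nat) : Int)) := by omega
    rw [hcast, show (1 : Int) = (((2 ^ 0 : Nat) : Int)) from rfl, pvAloop_bridge]
    rw [aloopN_neg (L + L2 + 2) a (p - t) 0 c (by omega) (by omega) (by omega)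
      (by simpa [cntR] using hc3) hc4]
    simp [Nat.mod_one]
  · -- t = p : A returns num1 unchanged, B copies all of a
    have heq : ((t : Int) - (p : Int)) = 0 := by omega
    rw [if_pos heq]
    have hmin : min t p = t := by omega
    rw [topSum_all (L + t) (by omega), hamod, hmin]
    simp only [Nat.sub_self, Nat.zero_add]
    rw [pass2_bridge, upN_zero]
  · -- p < t : A fills the lowest t - p unset bits; so does B after copying all of a
    have hne : ((t : Int) - (p : Int)) ≠ 0 := by omega
    rw [if_neg hne]
    have hmin : min t p = p := by omega
    rw [topSum_all (L + t) (by omega), hamod, hmin]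
    simp only [Nat.zero_add]
    rw [pass2_bridge]
    have hcast : (t : Int) - (p : Int) = ((t - p : Nat) : Int) := by omega
    rw [hcast, show (1 : Int) = (((2 ^ 0 : Nat) : Int)) from rfl, pvAloop_bridge, aloopN_pos]
    have hF : L + L2 + 2 = (L + t) + (L + L2 + 2 - (L + t)) := by omega
    rw [hF, upN_stable (L + t) _ a (t - p) 0 ?hz]
    case hz =>
      have h1 := cntR_zcntR a 0 (L + t)
      omega
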